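-- pv_equiv track=rewrite | github.com/m-a-fayyaz/nfl_custom_aggs | utils/helper_functions.py | agg_indexer
-- ===== SOURCE A (Python) =====
-- def level_list():
--     """
--     Central point to control possible aggregation levels
--
--     Returns:
--         list
--     """
--
--     return ['season', 'week', 'half', 'quarter', 'drive']
--
-- def by_list():
--     """
--     Central point to control possible subjects of aggregation
--
--     Returns:
--         list
--     """
--
--     return ['player', 'team', 'division', 'conference', 'league']
--
-- def agg_indexer(level='season', by='player', add_index=None):
--     """
--     Returns the index columns for a pbp dataframe at the specified level of aggregation
--
--     Args:
--         level (string): aggregation level (season, week, half, quarter, drive)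
--         by (string): specify subject to aggregate by (player, team, division, conference, league)
--         add_index (list[string]): extra columns to add to index
--     Returns:
--         list
--     """
--
--     # Check for valid inputs
--     if level not in level_list():
--         raise ValueError('Input for level must be one of the following: '+str(level_list()))
--
--     if by not in by_list():
--         raise ValueError('Input for by must be one of the following: '+str(by_list()))
--
--     if not isinstance(add_index, (list, tuple, type(None))):
--         raise ValueError('Input for add_index must be a list, tuple, or empty.')
--
--     if add_index!=None:
--         for x in add_index:
--             if not isinstance(x, str):
--                 raise ValueError('Invalid input \''+str(x)+'\': inputs for add_index must be strings')
--
--     # Initialize index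
--     agg_index = ['season']
--
--     # Extend for level
--     if level=='season':
--         pass
--     elif level=='week':
--         agg_index.extend(['game_id'])
--     elif level=='half':
--         agg_index.extend(['game_id', 'game_half'])
--     elif level=='quarter':
--         agg_index.extend(['game_id', 'game_half', 'game_quarter'])
--     elif level=='drive':
--         agg_index.extend(['game_id', 'game_half', 'game_quarter', 'fixed_drive'])
--     else:
--         raise ValueError('Input for level must be one of the following: '+str(level_list()))
--
--     # Extend for by
--     # No index needed for league
--     # Indexes for player aggs are added manually case-to-case
--     if by=='team':
--         agg_index.extend(['posteam_name'])
--     elif by=='division':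
--         agg_index.extend(['posteam_division'])
--     elif by=='conference':
--         agg_index.extend(['posteam_conference'])
--
--     # Extend for add_index
--     if add_index!=None: agg_index.extend(add_index)
--
--     return agg_index
-- ===== SOURCE B (Python) =====
-- def level_list():
--     return ['season', 'week', 'half', 'quarter', 'drive']
--
-- def by_list():
--     return ['player', 'team', 'division', 'conference', 'league']
--
-- _PARENT = {'week': 'season', 'half': 'week', 'quarter': 'half', 'drive': 'quarter'}
-- _LEVEL_COL = {'week': 'game_id', 'half': 'game_half', 'quarter': 'game_quarter', 'drive': 'fixed_drive'}
--
-- def _level_cols(level):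
--     # recursion on the level hierarchy: each level's index extends its parent's
--     if level == 'season':
--         return ['season']
--     return _level_cols(_PARENT[level]) + [_LEVEL_COL[level]]
--
-- def agg_indexer(level='season', by='player', add_index=None):
--     if level not in level_list():
--         raise ValueError('Input for level must be one of the following: '+str(level_list()))
--     if by not in by_list():
--         raise ValueError('Input for by must be one of the following: '+str(by_list()))
--     if not isinstance(add_index, (list, tuple, type(None))):
--         raise ValueError('Input for add_index must be a list, tuple, or empty.')
--     if add_index != None:
--         for x in add_index:
--             if not isinstance(x, str):
--                 raise ValueError('Invalid input \''+str(x)+'\': inputs for add_index must be strings')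
--     agg_index = _level_cols(level)
--     for b, col in [('team', 'posteam_name'), ('division', 'posteam_division'), ('conference', 'posteam_conference')]:
--         if b == by:
--             agg_index.append(col)
--     if add_index is not None:
--         agg_index += list(add_index)
--     return agg_index
-- ===== Notes on version B (the rewrite author's own statement) =====
-- stated objective: alternative
-- what changed: Replaces A's five-way branch cascade with structural recursion on a parent-chain of levels (each level's index extends its parent's) and the by-cascade with a single loop over (by, column) pairs appending on match.
import Mathlib
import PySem

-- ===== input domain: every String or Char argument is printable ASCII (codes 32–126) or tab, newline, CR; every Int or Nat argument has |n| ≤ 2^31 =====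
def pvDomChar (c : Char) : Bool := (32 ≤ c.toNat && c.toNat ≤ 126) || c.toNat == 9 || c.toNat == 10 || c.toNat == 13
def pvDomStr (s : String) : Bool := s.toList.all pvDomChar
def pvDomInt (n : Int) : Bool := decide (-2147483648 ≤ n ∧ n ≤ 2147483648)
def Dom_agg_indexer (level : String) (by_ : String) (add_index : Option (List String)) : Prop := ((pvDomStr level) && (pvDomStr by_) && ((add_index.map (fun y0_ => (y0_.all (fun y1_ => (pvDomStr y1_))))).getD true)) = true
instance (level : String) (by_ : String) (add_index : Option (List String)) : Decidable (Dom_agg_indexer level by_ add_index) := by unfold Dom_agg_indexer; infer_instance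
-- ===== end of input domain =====

-- ===== PORT A =====
-- B builds the level columns by recursion on a parent-chain of levels and the by-column with a loop over pairs, instead of A's two if/elif cascades; objective: alternative (same cost).
def agg_indexer (level : String) (by_ : String) (add_index : Option (List String)) : List String :=
  if level ∉ ["season", "week", "half", "quarter", "drive"] then []   -- raise ValueError (outside Pre_)
  else if by_ ∉ ["player", "team", "division", "conference", "league"] then []   -- raise ValueError (outside Pre_)
  else
    -- add_index is typed Option (List String): the isinstance checks always pass
    let agg_index := ["season"]
    let agg_index :=
      if level == "season" then agg_index
      else if level == "week" then agg_index ++ ["game_id"]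
      else if level == "half" then agg_index ++ ["game_id", "game_half"]
      else if level == "quarter" then agg_index ++ ["game_id", "game_half", "game_quarter"]
      else if level == "drive" then agg_index ++ ["game_id", "game_half", "game_quarter", "fixed_drive"]
      else []   -- unreachable raise
    let agg_index :=
      if by_ == "team" then agg_index ++ ["posteam_name"]
      else if by_ == "division" then agg_index ++ ["posteam_division"]
      else if by_ == "conference" then agg_index ++ ["posteam_conference"]
      else agg_index
    match add_index with
    | some xs => agg_index ++ xs
    | none => agg_index

-- ===== PORT B =====
def pvParent : PySem.Dict String String :=
  PySem.Dict.ofList [("week", "season"), ("half", "week"), ("quarter", "half"), ("drive", "quarter")]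
def pvLevelCol : PySem.Dict String String :=
  PySem.Dict.ofList [("week", "game_id"), ("half", "game_half"), ("quarter", "game_quarter"), ("drive", "fixed_drive")]

-- recursion on the level hierarchy; fuel bounds the recursion depth (Python's chain is acyclic, depth ≤ 4)
def pvLevelCols : Nat → String → List String
  | 0, _ => []   -- fuel exhausted (never reached for valid levels)
  | fuel + 1, level =>
    if level == "season" then ["season"]
    else pvLevelCols fuel ((PySem.Dict.get? pvParent level).getD "") ++ [(PySem.Dict.get? pvLevelCol level).getD ""]

def agg_indexer_alt (level : String) (by_ : String) (add_index : Option (List String)) : List String :=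
  if level ∉ ["season", "week", "half", "quarter", "drive"] then []   -- raise ValueError (outside Pre_)
  else if by_ ∉ ["player", "team", "division", "conference", "league"] then []   -- raise ValueError (outside Pre_)
  else
    let agg_index := pvLevelCols 5 level
    let agg_index :=
      [("team", "posteam_name"), ("division", "posteam_division"), ("conference", "posteam_conference")].foldl
        (fun acc (p : String × String) => if p.1 == by_ then acc ++ [p.2] else acc) agg_index
    match add_index with
    | some xs => agg_index ++ xs
    | none => agg_index

-- ===== PRECONDITION & SPEC =====
-- Pre_ excludes exactly the inputs where A raises ValueError: level or by outside the allowed lists.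
def Pre_agg_indexer (level : String) (by_ : String) (add_index : Option (List String)) : Prop :=
  level ∈ ["season", "week", "half", "quarter", "drive"] ∧ by_ ∈ ["player", "team", "division", "conference", "league"]
instance (level : String) (by_ : String) (add_index : Option (List String)) : Decidable (Pre_agg_indexer level by_ add_index) := by unfold Pre_agg_indexer; infer_instance
def pvWitness_agg_indexer : String × String × Option (List String) := ("week", "team", some ["stadium"])
def Spec_agg_indexer (level : String) (by_ : String) (add_index : Option (List String)) (out : List String) : Prop := out = agg_indexer_alt level by_ add_index
instance (level : String) (by_ : String) (add_index : Option (List String)) (out : List String) : Decidable (Spec_agg_indexer level by_ add_index out) := by unfold Spec_agg_indexer; infer_instance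

-- ===== CLAIM =====
def Claim_equal_agg_indexer : Prop := ∀ (level : String) (by_ : String) (add_index : Option (List String)), Dom_agg_indexer level by_ add_index → Pre_agg_indexer level by_ add_index → Spec_agg_indexer level by_ add_index (agg_indexer level by_ add_index)

-- ===== LEMMAS AND PROOFS =====

-- ===== VERDICT =====
theorem agg_indexer_spec : Claim_equal_agg_indexer := by
  intro level by_ add_index _ hpre
  unfold Spec_agg_indexer
  obtain ⟨hl, hb⟩ := hpre
  fin_cases hl <;> fin_cases hb <;> cases add_index <;> rfl
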